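-- pv_equiv track=rewrite | github.com/simeon-petrov-5/Hack-Bulgaria-Pypthon-101 | HackBulgaria_Day1.py | count_consonants
-- ===== SOURCE A (Python) =====
-- def count_consonants(str):
--     str = str.lower()
--     str = list(str)
--     total = 0
--
--     for i in str:
--         if i !="a" and i != "e" and i != "i" and i != "y" and i != "o" and i != "u" and i != "!" and i!= " " and i != "," and i != "?" and i != "." and i != "/":
--             total += 1
--     return total
-- ===== SOURCE B (Python) =====
-- EXCLUDED = "aeiyou! ,?./"
--
--
-- def count_consonants(str):
--     s = str.lower()
--     return len(s) - sum(s.count(ch) for ch in EXCLUDED)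
-- ===== Notes on version B (the rewrite author's own statement) =====
-- stated objective: alternative
-- what changed: B counts by complement: it lowercases once and returns len(s) minus the summed occurrence counts of the 12 excluded characters (vowels plus punctuation/space), replacing A's per-character 12-way branch loop.
import Mathlib
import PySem

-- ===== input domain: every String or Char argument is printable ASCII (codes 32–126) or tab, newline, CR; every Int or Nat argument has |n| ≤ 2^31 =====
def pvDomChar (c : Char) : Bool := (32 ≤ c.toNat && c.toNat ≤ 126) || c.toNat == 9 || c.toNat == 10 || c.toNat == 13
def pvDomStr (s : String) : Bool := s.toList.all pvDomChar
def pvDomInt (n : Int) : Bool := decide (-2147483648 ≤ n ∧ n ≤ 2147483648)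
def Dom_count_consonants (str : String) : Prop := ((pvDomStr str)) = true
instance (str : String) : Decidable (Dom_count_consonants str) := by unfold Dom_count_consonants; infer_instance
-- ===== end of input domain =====

-- B counts by complement (len minus summed counts of the excluded characters) instead of A's per-character branch loop; same result, 'alternative' objective.

-- ===== PORT A =====
def count_consonants (str : String) : Int :=
  let s := PySem.Str.lower str
  let l := s.toList
  l.foldl (fun total i =>
    if i ≠ 'a' ∧ i ≠ 'e' ∧ i ≠ 'i' ∧ i ≠ 'y' ∧ i ≠ 'o' ∧ i ≠ 'u' ∧ i ≠ '!' ∧ i ≠ ' ' ∧ i ≠ ',' ∧ i ≠ '?' ∧ i ≠ '.' ∧ i ≠ '/'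
    then total + 1 else total) 0

-- ===== PORT B =====
def pvExcluded : String := "aeiyou! ,?./"

def count_consonants_alt (str : String) : Int :=
  let s := PySem.Str.lower str
  (PySem.Str.len s) - ((pvExcluded.toList.map (fun ch => (PySem.Str.count s (String.ofList [ch]) : Int))).sum)

-- ===== PRECONDITION & SPEC =====
def Spec_count_consonants (str : String) (out : Int) : Prop := out = count_consonants_alt str
instance (str : String) (out : Int) : Decidable (Spec_count_consonants str out) := by unfold Spec_count_consonants; infer_instance

-- ===== CLAIM (what is proved, stated in full; the proofs are below) =====
def Claim_equal_count_consonants : Prop := ∀ (str : String), Dom_count_consonants str → Spec_count_consonants str (count_consonants str)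

-- ===== LEMMAS AND PROOFS =====

-- Chars.count with a single-character needle is List.count (unfolds the fueled go loop).
theorem pv_count_go_single (c : Char) :
    ∀ (l : List Char) (fuel acc : Nat), l.length ≤ fuel →
      PySem.Chars.count.go [c] fuel l acc = acc + l.count c := by
  intro l
  induction l with
  | nil => intro fuel acc _; cases fuel <;> simp [PySem.Chars.count.go]
  | cons h t ih =>
    intro fuel acc hle
    cases fuel with
    | zero => simp at hle
    | succ n =>
      have hlen : t.length ≤ n := by simpa using hle
      by_cases hc : c = h
      · subst hc
        simp [PySem.Chars.count.go, List.isPrefixOf, ih n (acc + 1) hlen, List.count_cons]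
        omega
      · simp [PySem.Chars.count.go, List.isPrefixOf, hc, ih n acc hlen, List.count_cons,
          Ne.symm hc]

theorem pv_chars_count_single (l : List Char) (c : Char) :
    PySem.Chars.count l [c] = l.count c := by
  simp [PySem.Chars.count, pv_count_go_single c l l.length 0 le_rfl]

def pvExcludedL : List Char := ['a','e','i','y','o','u','!',' ',',','?','.','/']

theorem pv_toList_excluded : pvExcluded.toList = pvExcludedL := rfl

-- counting members of e::E splits off count e when e ∉ E
theorem pv_countP_mem_cons (e : Char) (E : List Char) (he : e ∉ E) (l : List Char) :
    l.countP (fun c => decide (c = e) || decide (c ∈ E)) = l.count e + l.countP (fun c => decide (c ∈ E)) := by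
  induction l with
  | nil => simp
  | cons c l ih =>
    simp only [List.countP_cons, List.count_cons]
    by_cases hc : c = e
    · subst hc
      simp [he, ih]
      omega
    · simp [hc, ih]
      omega

-- summed per-character counts over a duplicate-free list of characters = membership count
theorem pv_sum_counts (E : List Char) (hE : E.Nodup) (l : List Char) :
    (E.map (fun ch => l.count ch)).sum = l.countP (fun c => decide (c ∈ E)) := by
  induction E with
  | nil => simp
  | cons e E' ih =>
    simp only [List.map_cons, List.sum_cons]
    rw [show (fun c => decide (c ∈ e :: E')) = (fun c => decide (c = e) || decide (c ∈ E'))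
        from by funext c; simp [List.mem_cons],
      pv_countP_mem_cons e E' (List.nodup_cons.mp hE).1 l, ih (List.nodup_cons.mp hE).2]

-- counts of the excluded and the kept characters partition the length
theorem pv_split (l : List Char) :
    l.countP (fun c => !decide (c ∈ pvExcludedL)) + l.countP (fun c => decide (c ∈ pvExcludedL))
      = l.length := by
  induction l with
  | nil => simp
  | cons c l ih =>
    by_cases h : c ∈ pvExcludedL <;> simp [List.countP_cons, h] <;> omega

-- A's 12-way conjunction is exactly non-membership in the excluded character list
theorem pv_pt (c : Char) :
    (decide (c ≠ 'a' ∧ c ≠ 'e' ∧ c ≠ 'i' ∧ c ≠ 'y' ∧ c ≠ 'o' ∧ c ≠ 'u' ∧ c ≠ '!' ∧ c ≠ ' ' ∧ c ≠ ',' ∧ c ≠ '?' ∧ c ≠ '.' ∧ c ≠ '/'))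
      = !decide (c ∈ pvExcludedL) := by
  simp [pvExcludedL]

-- ===== VERDICT (by name: the statement is the Claim_ definition above) =====
theorem count_consonants_spec : Claim_equal_count_consonants := by
  intro str _
  unfold Spec_count_consonants count_consonants count_consonants_alt
  simp only [PySem.Str.len_eq, PySem.Str.count_eq]
  rw [PySem.List.foldl_ite_add_one]
  simp only [String.toList_ofList, pv_chars_count_single, pv_toList_excluded]
  set l := (PySem.Str.lower str).toList with hl
  have hsum : (pvExcludedL.map (fun ch => (l.count ch : Int))).sum
      = ((pvExcludedL.map (fun ch => l.count ch)).sum : Int) := by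
    rw [Nat.cast_list_sum, List.map_map]; rfl
  have hcp : l.countP
      (fun i => decide (i ≠ 'a' ∧ i ≠ 'e' ∧ i ≠ 'i' ∧ i ≠ 'y' ∧ i ≠ 'o' ∧ i ≠ 'u' ∧ i ≠ '!' ∧ i ≠ ' ' ∧ i ≠ ',' ∧ i ≠ '?' ∧ i ≠ '.' ∧ i ≠ '/'))
      = l.countP (fun c => !decide (c ∈ pvExcludedL)) :=
    List.countP_congr (fun c _ => by rw [pv_pt c])
  have hsp := pv_split l
  have hsc := pv_sum_counts pvExcludedL (by decide) l
  rw [hsum, hcp]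
  omega
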